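-- pv_equiv track=rewrite | github.com/priamoryki/Sudoku-Solver | SudokuSolver.py | get_shifts
-- ===== SOURCE A (Python) =====
-- def get_shifts(v):
--     block_size = 3
--     result = [i for i in range(1, block_size)]
--     shift = v % block_size + 1
--     for i in range(len(result)):
--         if (result[i] == shift):
--             shift -= 1
--         result[i] -= shift
--     return result
-- ===== SOURCE B (Python) =====
-- def get_shifts(v):
--     block_size = 3
--     m = v % block_size
--     return [j - m for j in range(block_size) if j != m]
-- ===== Notes on version B (the rewrite author's own statement) =====
-- stated objective: simpler
-- what changed: B computes the within-block position m = v mod block_size once and directly emits the signed offsets j - m for every other position j in range(block_size), replacing A's mutate-in-place loop with a decremented shift accumulator.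
import Mathlib
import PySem

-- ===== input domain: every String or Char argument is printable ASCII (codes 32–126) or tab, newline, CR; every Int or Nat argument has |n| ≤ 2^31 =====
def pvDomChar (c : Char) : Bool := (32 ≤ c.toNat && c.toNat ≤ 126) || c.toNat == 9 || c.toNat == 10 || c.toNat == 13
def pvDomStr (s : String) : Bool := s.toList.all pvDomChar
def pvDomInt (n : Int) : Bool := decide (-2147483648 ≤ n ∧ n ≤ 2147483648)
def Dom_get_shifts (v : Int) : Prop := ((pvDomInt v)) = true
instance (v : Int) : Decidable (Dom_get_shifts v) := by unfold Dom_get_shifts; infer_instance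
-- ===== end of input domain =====

-- B replaces A's mutate-in-place loop (decrementing shift accumulator over [1,2]) by directly
-- enumerating range(3), skipping the current within-block position m = v mod block_size, and emitting j - m.

-- ===== PORT A =====
-- literal transliteration: result = [1,2]; shift = v % 3 + 1; loop over indices mutating
-- (result, shift); result[i] read via pyGetD (indices produced by range(len(result)) are in range).
def get_shifts (v : Int) : List Int :=
  let block_size : Int := 3
  let result : List Int := PySem.List.pyRange 1 block_size 1
  let shift : Int := PySem.Int.mod v block_size + 1
  let st := (List.range result.length).foldl
    (fun (st : List Int × Int) (i : Nat) =>
      let shift' := if PySem.List.pyGetD st.1 (i : Int) 0 = st.2 then st.2 - 1 else st.2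
      (st.1.set i (PySem.List.pyGetD st.1 (i : Int) 0 - shift'), shift'))
    (result, shift)
  st.1

-- ===== PORT B =====
-- [j - m for j in range(block_size) if j != m]
def get_shifts_alt (v : Int) : List Int :=
  let block_size : Int := 3
  let m : Int := PySem.Int.mod v block_size
  ((PySem.List.pyRange 0 block_size 1).filter (fun j => j ≠ m)).map (fun j => j - m)

-- ===== PRECONDITION & SPEC =====
def Spec_get_shifts (v : Int) (out : List Int) : Prop := out = get_shifts_alt v
instance (v : Int) (out : List Int) : Decidable (Spec_get_shifts v out) := by unfold Spec_get_shifts; infer_instance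

-- ===== CLAIM (what is proved, stated in full; the proofs are below) =====
def Claim_equal_get_shifts : Prop := ∀ (v : Int), Dom_get_shifts v → Spec_get_shifts v (get_shifts v)

-- ===== LEMMAS AND PROOFS =====
-- both ports depend on v only through m = v % 3 ∈ {0,1,2}; check the three cases by evaluation
theorem get_shifts_mod_cases (v : Int) :
    PySem.Int.mod v 3 = 0 ∨ PySem.Int.mod v 3 = 1 ∨ PySem.Int.mod v 3 = 2 := by
  have h0 := PySem.Int.mod_nonneg v (b := 3) (by norm_num)
  have h1 := PySem.Int.mod_lt v (b := 3) (by norm_num)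
  omega

-- ===== VERDICT (by name: the statement is the Claim_ definition above) =====
theorem get_shifts_spec : Claim_equal_get_shifts := by
  intro v _
  unfold Spec_get_shifts get_shifts get_shifts_alt
  rcases get_shifts_mod_cases v with h | h | h <;> simp only [h] <;> decide
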